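-- pv_equiv track=rewrite | github.com/MassiPozzuto/IP | Python/P10/ej3.py | subsecuencia_mas_larga
-- ===== SOURCE A (Python) =====
-- def subsecuencia_mas_larga(tipos_pacientes_atendidos: list[str]) -> int:
--     subsecuencia_mas_larga:tuple = (0, 0)
--
--     subsecuencia_actual:list[str] = []
--     for i in range(len(tipos_pacientes_atendidos)):
--         if tipos_pacientes_atendidos[i] == 'perro' or tipos_pacientes_atendidos[i] == 'gato':
--             subsecuencia_actual.append(i)
--         else:
--             if len(subsecuencia_actual) > subsecuencia_mas_larga[1]:
--                 subsecuencia_mas_larga = (i - len(subsecuencia_actual), len(subsecuencia_actual))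
--             subsecuencia_actual.clear()
--
--     if len(subsecuencia_actual) > subsecuencia_mas_larga[1]:
--         indice_subsecuencia:int = len(tipos_pacientes_atendidos) - len(subsecuencia_actual)
--         subsecuencia_mas_larga = (indice_subsecuencia, len(subsecuencia_actual))
--
--     return subsecuencia_mas_larga[0]
-- ===== SOURCE B (Python) =====
-- def subsecuencia_mas_larga(tipos_pacientes_atendidos: list[str]) -> int:
--     n = len(tipos_pacientes_atendidos)
--     pref = [0]
--     for x in tipos_pacientes_atendidos:
--         pref.append(pref[-1] + (x == 'perro' or x == 'gato'))
--
--     def has(L):  # is there a window of length L made only of pets?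
--         return any(pref[s + L] - pref[s] == L for s in range(n - L + 1))
--
--     # binary search the maximal all-pet window length
--     lo, hi = 0, n
--     while lo < hi:
--         mid = (lo + hi + 1) // 2
--         if has(mid):
--             lo = mid
--         else:
--             hi = mid - 1
--     if lo == 0:
--         return 0
--     return next(s for s in range(n - lo + 1) if pref[s + lo] - pref[s] == lo)
-- ===== Notes on version B (the rewrite author's own statement) =====
-- stated objective: alternative
-- what changed: Instead of A's single scan that tracks the current run and best (start,length) pair, B computes prefix sums of the pet indicator, binary-searches the maximal length L such that some length-L window contains only 'perro'/'gato', and then scans for the first window of that length.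
import Mathlib
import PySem

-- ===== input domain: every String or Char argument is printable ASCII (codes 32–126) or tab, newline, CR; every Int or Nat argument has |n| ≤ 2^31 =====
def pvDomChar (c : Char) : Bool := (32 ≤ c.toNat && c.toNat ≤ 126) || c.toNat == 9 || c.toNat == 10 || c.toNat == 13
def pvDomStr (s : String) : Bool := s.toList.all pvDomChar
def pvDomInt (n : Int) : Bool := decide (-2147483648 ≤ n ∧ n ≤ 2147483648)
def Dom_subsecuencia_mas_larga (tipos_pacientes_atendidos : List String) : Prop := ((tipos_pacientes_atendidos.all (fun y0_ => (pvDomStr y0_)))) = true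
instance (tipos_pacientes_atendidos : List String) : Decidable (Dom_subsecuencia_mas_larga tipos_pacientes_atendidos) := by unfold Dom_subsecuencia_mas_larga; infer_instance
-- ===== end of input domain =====

-- B replaces A's one-pass run-tracking scan by a different algorithm: prefix sums of the
-- pet indicator, a binary search for the maximal all-pet window length, then a scan for
-- the first window of that length (alternative; not claimed faster).

-- ===== PORT A =====
-- A's for-loop as structural recursion; state = (subsecuencia_mas_larga, subsecuencia_actual)
def loopA : List String → Int → (Int × Int) → List Int → (Int × Int) × List Int
  | [], _, best, cur => (best, cur)
  | x :: rest, i, best, cur =>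
    if x == "perro" || x == "gato" then
      loopA rest (i + 1) best (cur ++ [i])
    else if (cur.length : Int) > best.2 then
      loopA rest (i + 1) (i - (cur.length : Int), (cur.length : Int)) []
    else
      loopA rest (i + 1) best []

def subsecuencia_mas_larga (tipos_pacientes_atendidos : List String) : Int :=
  let r := loopA tipos_pacientes_atendidos 0 (0, 0) []
  if (r.2.length : Int) > r.1.2 then
    (tipos_pacientes_atendidos.length : Int) - (r.2.length : Int)
  else
    r.1.1

-- ===== PORT B =====
def esMascota (x : String) : Bool := x == "perro" || x == "gato"

-- B builds pref by appending pref[-1] + indicator for each element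
def buildPref : List String → Nat → List Nat
  | [], _ => []
  | x :: r, acc =>
    let acc' := acc + (if esMascota x then 1 else 0)
    acc' :: buildPref r acc'

def prefOf (xs : List String) : List Nat := 0 :: buildPref xs 0

-- B's has(L): some window of length L has pet count L (only invoked with 1 ≤ L ≤ n,
-- where Python's range(n - L + 1) coincides with List.range (n - L + 1))
def hasB (pref : List Nat) (n L : Nat) : Bool :=
  (List.range (n - L + 1)).any fun s => pref.getD (s + L) 0 - pref.getD s 0 == L

-- B's while-loop as fuel recursion; the gap hi - lo shrinks every iteration, so fuel = n suffices
def bsrch (pref : List Nat) (n : Nat) : Nat → Nat → Nat → Nat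
  | 0, lo, _ => lo
  | fuel + 1, lo, hi =>
    if lo < hi then
      let mid := (lo + hi + 1) / 2
      if hasB pref n mid then bsrch pref n fuel mid hi
      else bsrch pref n fuel lo (mid - 1)
    else lo

def subsecuencia_mas_larga_alt (tipos_pacientes_atendidos : List String) : Int :=
  let n := tipos_pacientes_atendidos.length
  let pref := prefOf tipos_pacientes_atendidos
  let L := bsrch pref n n 0 n
  if L = 0 then 0
  else
    -- Python's next(...); a window of length L exists, so find? always succeeds here
    ((((List.range (n - L + 1)).find? fun s =>
        pref.getD (s + L) 0 - pref.getD s 0 == L).getD 0 : Nat) : Int)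

-- ===== PRECONDITION & SPEC =====
def Spec_subsecuencia_mas_larga (tipos_pacientes_atendidos : List String) (out : Int) : Prop := out = subsecuencia_mas_larga_alt tipos_pacientes_atendidos
instance (tipos_pacientes_atendidos : List String) (out : Int) : Decidable (Spec_subsecuencia_mas_larga tipos_pacientes_atendidos out) := by unfold Spec_subsecuencia_mas_larga; infer_instance

-- ===== CLAIM (what is proved, stated in full; the proofs are below) =====
def Claim_equal_subsecuencia_mas_larga : Prop := ∀ (tipos_pacientes_atendidos : List String), Dom_subsecuencia_mas_larga tipos_pacientes_atendidos → Spec_subsecuencia_mas_larga tipos_pacientes_atendidos (subsecuencia_mas_larga tipos_pacientes_atendidos)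

-- ===== LEMMAS AND PROOFS =====
def loopA' : List String → Int → (Int × Int) → Int → (Int × Int) × Int
  | [], _, best, c => (best, c)
  | x :: rest, i, best, c =>
    if x == "perro" || x == "gato" then
      loopA' rest (i + 1) best (c + 1)
    else if c > best.2 then
      loopA' rest (i + 1) (i - c, c) 0
    else
      loopA' rest (i + 1) best 0

def finA (xs : List String) (off : Int) (best : Int × Int) : Int :=
  let r := loopA' xs off best 0
  if r.2 > r.1.2 then (off + (xs.length : Int)) - r.2 else r.1.1

lemma loopA'_pets : ∀ (ys zs : List String), (∀ y ∈ ys, esMascota y = true) →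
    ∀ (i : Int) (best : Int × Int) (c : Int),
    loopA' (ys ++ zs) i best c = loopA' zs (i + (ys.length : Int)) best (c + (ys.length : Int)) := by
  intro ys
  induction ys with
  | nil => intro zs _ i best c; simp
  | cons y ys' ih =>
    intro zs h i best c
    have hy : (y == "perro" || y == "gato") = true := h y (by simp)
    have := ih zs (fun a ha => h a (by simp [ha])) (i + 1) best (c + 1)
    simp only [List.cons_append, loopA', hy, if_pos]
    rw [this]
    have e1 : i + 1 + ((ys'.length : Int)) = i + ((ys'.length : Int) + 1) := by ring
    have e2 : c + 1 + ((ys'.length : Int)) = c + ((ys'.length : Int) + 1) := by ring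
    simp [e1, e2]


lemma loopA_sim : ∀ (xs : List String) (i : Int) (best : Int × Int) (cur : List Int),
    (loopA xs i best cur).1 = (loopA' xs i best (cur.length : Int)).1 ∧
    ((loopA xs i best cur).2.length : Int) = (loopA' xs i best (cur.length : Int)).2 := by
  intro xs
  induction xs with
  | nil => intro i best cur; simp [loopA, loopA']
  | cons x rest ih =>
    intro i best cur
    by_cases h : (x == "perro" || x == "gato") = true
    · have := ih (i + 1) best (cur ++ [i])
      simpa [loopA, loopA', h, Int.add_comm] using this
    · by_cases h2 : (cur.length : Int) > best.2
      · have := ih (i + 1) (i - (cur.length : Int), (cur.length : Int)) []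
        simpa [loopA, loopA', h, h2] using this
      · have := ih (i + 1) best []
        simpa [loopA, loopA', h, h2] using this

lemma drop_tw (p : String → Bool) (xs : List String) :
    xs.drop (xs.takeWhile p).length = xs.dropWhile p := by
  conv_lhs => rw [show xs.drop (xs.takeWhile p).length
      = (xs.takeWhile p ++ xs.dropWhile p).drop (xs.takeWhile p).length by
        rw [List.takeWhile_append_dropWhile]]
  rw [List.drop_left]

lemma sep_false (xs : List String) (hlt : (xs.takeWhile esMascota).length < xs.length) :
    esMascota (xs[(xs.takeWhile esMascota).length]'hlt) = false := by
  have h2 := drop_tw esMascota xs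
  have h3 : (xs.dropWhile esMascota).length = xs.length - (xs.takeWhile esMascota).length := by
    rw [← h2, List.length_drop]
  have h4 : xs.dropWhile esMascota ≠ [] := by
    intro h; rw [h] at h3; simp at h3; omega
  have h5 := List.head?_dropWhile_not esMascota xs
  cases hdc : xs.dropWhile esMascota with
  | nil => exact absurd hdc h4
  | cons z zr =>
    rw [hdc] at h5; simp at h5
    have h6 : xs[(xs.takeWhile esMascota).length]? = some z := by
      rw [show xs[(xs.takeWhile esMascota).length]? = (xs.drop (xs.takeWhile esMascota).length)[0]? by
        rw [List.getElem?_drop]; ring_nf]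
      rw [h2, hdc]; rfl
    rw [List.getElem?_eq_getElem hlt] at h6
    have h7 : xs[(xs.takeWhile esMascota).length]'hlt = z := by injection h6
    rw [h7]; exact h5

lemma sep_kills (xs : List String) (s L : Nat)
    (hlt : (xs.takeWhile esMascota).length < xs.length)
    (hs : s ≤ (xs.takeWhile esMascota).length) (hL : (xs.takeWhile esMascota).length < s + L) :
    ¬ (((xs.drop s).take L).all esMascota = true) := by
  intro hall
  set h := (xs.takeWhile esMascota).length with hh
  have hidx : h - s < (((xs.drop s).take L)).length := by
    simp [List.length_take, List.length_drop]; omega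
  have he : ((xs.drop s).take L)[h - s]'hidx = xs[h]'hlt := by
    rw [List.getElem_take, List.getElem_drop]
    congr 1; omega
  have := List.all_eq_true.mp hall _ (List.getElem_mem hidx)
  rw [he, sep_false xs hlt] at this
  exact absurd this (by simp)

lemma mem_tw : ∀ (p : String → Bool) (xs : List String) (a : String),
    a ∈ xs.takeWhile p → p a = true := by
  intro p xs
  induction xs with
  | nil => intro a ha; simp [List.takeWhile] at ha
  | cons x r ih =>
    intro a ha
    by_cases hx : p x = true
    · rw [List.takeWhile_cons_of_pos hx] at ha
      rcases List.mem_cons.mp ha with h | h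
      · subst h; exact hx
      · exact ih a h
    · rw [List.takeWhile_cons_of_neg (by simpa using hx)] at ha
      simp at ha

lemma take_tw (xs : List String) (L : Nat) (hL : L ≤ (xs.takeWhile esMascota).length) :
    (xs.take L).all esMascota = true := by
  rw [show xs.take L = (xs.takeWhile esMascota).take L by
    conv_lhs => rw [← List.takeWhile_append_dropWhile (p := esMascota) (l := xs)]
    rw [List.take_append_of_le_length hL]]
  rw [List.all_eq_true]
  intro a ha
  exact mem_tw esMascota xs a (List.mem_of_mem_take ha)

lemma buildPref_getD : ∀ (xs : List String) (acc i : Nat), i < xs.length →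
    (buildPref xs acc).getD i 0 = acc + (xs.take (i + 1)).countP esMascota := by
  intro xs
  induction xs with
  | nil => intro acc i h; simp at h
  | cons x r ih =>
    intro acc i h
    cases i with
    | zero =>
      by_cases hx : esMascota x = true <;> simp [buildPref, hx]
    | succ j =>
      have := ih (acc + (if esMascota x then 1 else 0)) j (by simp at h; omega)
      simp only [buildPref, List.getD_cons_succ, List.take_succ_cons, List.countP_cons, this]
      by_cases hx : esMascota x = true
      · simp [hx]; omega
      · simp [hx]

lemma getD_prefOf (xs : List String) (i : Nat) (hi : i ≤ xs.length) :
    (prefOf xs).getD i 0 = (xs.take i).countP esMascota := by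
  cases i with
  | zero => simp [prefOf]
  | succ j =>
    have := buildPref_getD xs 0 j (by omega)
    simp only [prefOf, List.getD_cons_succ, this]
    omega

lemma window_pred_iff (xs : List String) (s L : Nat) (h : s + L ≤ xs.length) :
    ((prefOf xs).getD (s + L) 0 - (prefOf xs).getD s 0 == L) =
      (((xs.drop s).take L).all esMascota) := by
  rw [getD_prefOf xs (s + L) h, getD_prefOf xs s (by omega)]
  have hsplit : xs.take (s + L) = xs.take s ++ (xs.drop s).take L := by
    rw [← List.take_add]
  rw [hsplit, List.countP_append, Nat.add_sub_cancel_left]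
  have hlen : ((xs.drop s).take L).length = L := by
    simp [List.length_take, List.length_drop]; omega
  cases hall : (((xs.drop s).take L).all esMascota) with
  | true =>
    have hB : ((xs.drop s).take L).countP esMascota = ((xs.drop s).take L).length :=
      List.countP_eq_length.mpr (fun a ha => List.all_eq_true.mp hall a ha)
    rw [hlen] at hB
    simp [hB]
  | false =>
    obtain ⟨a, ha, hpa⟩ := List.all_eq_false.mp hall
    have hle := List.countP_le_length (p := esMascota) (l := (xs.drop s).take L)
    have hne : ((xs.drop s).take L).countP esMascota ≠ ((xs.drop s).take L).length :=
      fun he => absurd (List.countP_eq_length.mp he a ha) (by simpa using hpa)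
    rw [Bool.eq_false_iff]
    intro hbeq
    simp only [beq_iff_eq] at hbeq
    omega

def hasW (xs : List String) (L : Nat) : Prop :=
  ∃ s, s + L ≤ xs.length ∧ (((xs.drop s).take L).all esMascota) = true

lemma hasB_iff (xs : List String) (L : Nat) (hL : L ≤ xs.length) :
    hasB (prefOf xs) xs.length L = true ↔ hasW xs L := by
  unfold hasB hasW
  rw [List.any_eq_true]
  constructor
  · rintro ⟨s, hs, hp⟩
    rw [List.mem_range] at hs
    have hsl : s + L ≤ xs.length := by omega
    exact ⟨s, hsl, by rw [← window_pred_iff xs s L hsl]; exact hp⟩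
  · rintro ⟨s, hsl, hall⟩
    exact ⟨s, List.mem_range.mpr (by omega), by rw [window_pred_iff xs s L hsl]; exact hall⟩

def ansRef (xs : List String) : Nat × Nat :=
  let h := (xs.takeWhile esMascota).length
  if hh : h = xs.length then (0, h)
  else
    let p := ansRef (xs.drop (h + 1))
    if p.2 > h then (h + 1 + p.1, p.2) else (0, h)
termination_by xs.length
decreasing_by
  have := (List.takeWhile_sublist (p := esMascota) (l := xs)).length_le
  simp only [List.length_drop]
  omega


lemma ansRef_nil : ansRef [] = (0, 0) := by rw [ansRef]; simp

lemma hasW_split (xs : List String) (L : Nat)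
    (hlt : (xs.takeWhile esMascota).length < xs.length) :
    hasW xs L ↔ L ≤ (xs.takeWhile esMascota).length ∨
      hasW (xs.drop ((xs.takeWhile esMascota).length + 1)) L := by
  set h := (xs.takeWhile esMascota).length with hdef
  constructor
  · rintro ⟨s, hsL, hall⟩
    by_cases h1 : s + L ≤ h
    · left; omega
    · by_cases h2 : h + 1 ≤ s
      · right
        refine ⟨s - (h + 1), by simp [List.length_drop]; omega, ?_⟩
        rw [List.drop_drop, show h + 1 + (s - (h + 1)) = s by omega]
        exact hall
      · exact absurd hall (sep_kills xs s L hlt (by omega) (by omega))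
  · rintro (h1 | ⟨s, hsL, hall⟩)
    · exact ⟨0, by omega, by simpa using take_tw xs L h1⟩
    · refine ⟨h + 1 + s, ?_, ?_⟩
      · simp [List.length_drop] at hsL; omega
      · rw [← List.drop_drop]; exact hall

lemma hasW_iff_le : ∀ (n : Nat) (xs : List String), xs.length ≤ n → ∀ L,
    (hasW xs L ↔ L ≤ (ansRef xs).2) := by
  intro n
  induction n with
  | zero =>
    intro xs hlen L
    have hx : xs = [] := List.length_eq_zero_iff.mp (Nat.le_zero.mp hlen)
    subst hx
    rw [ansRef_nil]
    constructor
    · rintro ⟨s, hs, _⟩; simp at hs ⊢; omega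
    · intro hL
      simp at hL
      exact ⟨0, by simp [hL], by simp [hL]⟩
  | succ n ih =>
    intro xs hlen L
    by_cases hh : (xs.takeWhile esMascota).length = xs.length
    · rw [ansRef, dif_pos hh]
      have htw : xs.takeWhile esMascota = xs :=
        (List.takeWhile_prefix esMascota).eq_of_length hh
      constructor
      · rintro ⟨s, hs, _⟩; omega
      · intro hL
        exact ⟨0, by omega, by simpa using take_tw xs L (by omega)⟩
    · have hlt : (xs.takeWhile esMascota).length < xs.length :=
        lt_of_le_of_ne (List.takeWhile_sublist _).length_le hh
      rw [hasW_split xs L hlt, ansRef, dif_neg hh]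
      have hihtail := ih (xs.drop ((xs.takeWhile esMascota).length + 1))
        (by simp [List.length_drop]; omega) L
      rw [hihtail]
      by_cases hph : (ansRef (xs.drop ((xs.takeWhile esMascota).length + 1))).2 >
          (xs.takeWhile esMascota).length
      · rw [if_pos hph]
        simp only
        constructor
        · rintro (h1 | h1) <;> omega
        · intro h1; right; omega
      · rw [if_neg hph]
        simp only
        constructor
        · rintro (h1 | h1) <;> omega
        · intro h1; left; omega

lemma ansRef_win : ∀ (n : Nat) (xs : List String), xs.length ≤ n →
    (ansRef xs).1 + (ansRef xs).2 ≤ xs.length ∧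
    ((xs.drop (ansRef xs).1).take (ansRef xs).2).all esMascota = true := by
  intro n
  induction n with
  | zero =>
    intro xs hlen
    have hx : xs = [] := List.length_eq_zero_iff.mp (Nat.le_zero.mp hlen)
    subst hx
    rw [ansRef]; simp
  | succ n ih =>
    intro xs hlen
    by_cases hh : (xs.takeWhile esMascota).length = xs.length
    · rw [ansRef, dif_pos hh]
      exact ⟨by simp; omega, by simpa using take_tw xs _ le_rfl⟩
    · have hlt : (xs.takeWhile esMascota).length < xs.length :=
        lt_of_le_of_ne (List.takeWhile_sublist _).length_le hh
      have htail := ih (xs.drop ((xs.takeWhile esMascota).length + 1))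
        (by simp [List.length_drop]; omega)
      rw [ansRef, dif_neg hh]
      by_cases hph : (ansRef (xs.drop ((xs.takeWhile esMascota).length + 1))).2 >
          (xs.takeWhile esMascota).length
      · rw [if_pos hph]
        simp only [List.length_drop] at htail
        refine ⟨by simp only; omega, ?_⟩
        simp only
        have hdd : (xs.drop ((xs.takeWhile esMascota).length + 1)).drop
              (ansRef (xs.drop ((xs.takeWhile esMascota).length + 1))).1 =
            xs.drop ((xs.takeWhile esMascota).length + 1 +
              (ansRef (xs.drop ((xs.takeWhile esMascota).length + 1))).1) := by
          rw [List.drop_drop]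
        rw [← hdd]
        exact htail.2
      · rw [if_neg hph]
        exact ⟨by simp; omega, by simpa using take_tw xs _ le_rfl⟩

lemma ansRef_min : ∀ (n : Nat) (xs : List String), xs.length ≤ n → ∀ j, j < (ansRef xs).1 →
    ¬ (((xs.drop j).take (ansRef xs).2).all esMascota = true) := by
  intro n
  induction n with
  | zero =>
    intro xs hlen j hj
    have hx : xs = [] := List.length_eq_zero_iff.mp (Nat.le_zero.mp hlen)
    subst hx
    rw [ansRef] at hj; simp at hj
  | succ n ih =>
    intro xs hlen j hj
    by_cases hh : (xs.takeWhile esMascota).length = xs.length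
    · rw [ansRef, dif_pos hh] at hj; simp at hj
    · have hlt : (xs.takeWhile esMascota).length < xs.length :=
        lt_of_le_of_ne (List.takeWhile_sublist _).length_le hh
      rw [ansRef, dif_neg hh] at hj ⊢
      by_cases hph : (ansRef (xs.drop ((xs.takeWhile esMascota).length + 1))).2 >
          (xs.takeWhile esMascota).length
      · rw [if_pos hph] at hj ⊢
        simp only at hj ⊢
        by_cases h2 : j ≤ (xs.takeWhile esMascota).length
        · exact sep_kills xs j _ hlt h2 (by omega)
        · have hj' : j - ((xs.takeWhile esMascota).length + 1) <
              (ansRef (xs.drop ((xs.takeWhile esMascota).length + 1))).1 := by omega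
          have := ih (xs.drop ((xs.takeWhile esMascota).length + 1))
            (by simp [List.length_drop]; omega) _ hj'
          rw [List.drop_drop, show (xs.takeWhile esMascota).length + 1 +
            (j - ((xs.takeWhile esMascota).length + 1)) = j by omega] at this
          exact this
      · rw [if_neg hph] at hj; simp at hj

lemma finA_ansRef : ∀ (n : Nat) (xs : List String) (off bs bl : Int), xs.length ≤ n → 0 ≤ bl →
    finA xs off (bs, bl) =
      if ((ansRef xs).2 : Int) > bl then off + ((ansRef xs).1 : Int) else bs := by
  intro n
  induction n with
  | zero =>
    intro xs off bs bl hlen hbl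
    have hx : xs = [] := List.length_eq_zero_iff.mp (Nat.le_zero.mp hlen)
    subst hx
    rw [ansRef_nil]
    simp only [finA, loopA', List.length_nil, Nat.cast_zero]
    rw [if_neg (by omega), if_neg (by omega)]
  | succ n ih =>
    intro xs off bs bl hlen hbl
    have hxs : xs.takeWhile esMascota ++ xs.dropWhile esMascota = xs :=
      List.takeWhile_append_dropWhile
    have htwp : ∀ y ∈ xs.takeWhile esMascota, esMascota y = true := mem_tw esMascota xs
    set h := (xs.takeWhile esMascota).length with hhd
    have hloop0 : loopA' xs off (bs, bl) 0 =
        loopA' (xs.dropWhile esMascota) (off + (h : Int)) (bs, bl) (0 + (h : Int)) := by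
      conv_lhs => rw [← hxs]
      exact loopA'_pets _ _ htwp off (bs, bl) 0
    by_cases hh : h = xs.length
    · -- no separator: xs is all pets
      have hdw : xs.dropWhile esMascota = [] := by
        have := drop_tw esMascota xs
        have hlen2 : (xs.dropWhile esMascota).length = 0 := by
          rw [← this, List.length_drop]; omega
        exact List.length_eq_zero_iff.mp hlen2
      rw [show ansRef xs = (0, h) from by rw [ansRef]; exact dif_pos hh]
      simp only [finA, hloop0, hdw, loopA', zero_add]
      by_cases hc : (h : Int) > bl
      · rw [if_pos hc, if_pos hc]
        rw [← hh]
        ring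
      · rw [if_neg hc, if_neg hc]
    · -- separator exists
      have hlt : h < xs.length := lt_of_le_of_ne (List.takeWhile_sublist _).length_le hh
      have hdd := drop_tw esMascota xs
      cases hdc : xs.dropWhile esMascota with
      | nil =>
        rw [hdc] at hdd
        have : xs.length - h = 0 := by rw [← List.length_drop, hdd]; simp
        omega
      | cons z zr =>
        have hz : esMascota z = false := by
          have h5 := List.head?_dropWhile_not esMascota xs
          rw [hdc] at h5; simpa using h5
        have hz' : (z == "perro" || z == "gato") = false := by simpa [esMascota] using hz
        have hzr : xs.drop (h + 1) = zr := by
          have : (xs.drop h).drop 1 = xs.drop (h + 1) := by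
            rw [List.drop_drop]
          rw [← this, hdd, hdc]
          simp
        have hlenzr : zr.length = xs.length - (h + 1) := by
          rw [← hzr, List.length_drop]
        -- A takes one step at the separator
        have hstep : loopA' (z :: zr) (off + (h : Int)) (bs, bl) (0 + (h : Int)) =
            if (h : Int) > bl then loopA' zr (off + (h : Int) + 1) (off, (h : Int)) 0
            else loopA' zr (off + (h : Int) + 1) (bs, bl) 0 := by
          by_cases hc : (h : Int) > bl
          · rw [if_pos hc]
            simp only [loopA', hz', Bool.false_eq_true, if_false]
            rw [if_pos (by simpa using hc)]
            congr 2
            · ring_nf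
            · simp
          · rw [if_neg hc]
            simp only [loopA', hz', Bool.false_eq_true, if_false]
            rw [if_neg (by simpa using hc)]
        have hoffn : off + (xs.length : Int) = (off + (h : Int) + 1) + (zr.length : Int) := by
          rw [hlenzr]; omega
        have hfin : finA xs off (bs, bl) =
            if (h : Int) > bl then finA zr (off + (h : Int) + 1) (off, (h : Int))
            else finA zr (off + (h : Int) + 1) (bs, bl) := by
          simp only [finA, hloop0, hdc, hstep, hoffn]
          by_cases hc : (h : Int) > bl
          · rw [if_pos hc, if_pos hc]
          · rw [if_neg hc, if_neg hc]
        have hans : ansRef xs =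
            if (ansRef zr).2 > h then (h + 1 + (ansRef zr).1, (ansRef zr).2) else (0, h) := by
          rw [ansRef, dif_neg hh, hzr]
        have hihz : zr.length ≤ n := by omega
        rw [hfin, hans]
        by_cases hc : (h : Int) > bl
        · rw [if_pos hc, ih zr (off + (h : Int) + 1) off (h : Int) hihz (by omega)]
          by_cases hp : (ansRef zr).2 > h
          · rw [if_pos hp, if_pos (by omega), if_pos (by omega)]
            push_cast
            ring
          · rw [if_neg hp, if_neg (by omega), if_pos (by omega)]
            push_cast
            ring
        · rw [if_neg hc, ih zr (off + (h : Int) + 1) bs bl hihz hbl]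
          by_cases hp : (ansRef zr).2 > h
          · by_cases hq : ((ansRef zr).2 : Int) > bl
            · rw [if_pos hp, if_pos hq, if_pos (by push_cast; omega)]
              push_cast; ring
            · rw [if_pos hp, if_neg hq, if_neg (by push_cast; omega)]
          · rw [if_neg hp]
            have hq : ¬ ((ansRef zr).2 : Int) > bl := by push_cast at hc ⊢; omega
            rw [if_neg hq, if_neg (by simpa using hc)]

lemma bsrch_eq : ∀ (fuel : Nat) (xs : List String) (lo hi : Nat), hi - lo ≤ fuel →
    lo ≤ (ansRef xs).2 → (ansRef xs).2 ≤ hi → hi ≤ xs.length →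
    bsrch (prefOf xs) xs.length fuel lo hi = (ansRef xs).2 := by
  intro fuel
  induction fuel with
  | zero =>
    intro xs lo hi h1 h2 h3 _
    simp only [bsrch]
    omega
  | succ fuel ih =>
    intro xs lo hi h1 h2 h3 h4
    simp only [bsrch]
    by_cases hlh : lo < hi
    · rw [if_pos hlh]
      have hmid1 : lo < (lo + hi + 1) / 2 := by omega
      have hmid2 : (lo + hi + 1) / 2 ≤ hi := by omega
      have hiff : hasB (prefOf xs) xs.length ((lo + hi + 1) / 2) = true ↔
          (lo + hi + 1) / 2 ≤ (ansRef xs).2 := by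
        rw [hasB_iff xs _ (by omega),
          hasW_iff_le xs.length xs le_rfl]
      by_cases hm : (lo + hi + 1) / 2 ≤ (ansRef xs).2
      · rw [if_pos (hiff.mpr hm)]
        exact ih xs _ hi (by omega) hm h3 h4
      · rw [if_neg (by rw [hiff]; exact hm)]
        exact ih xs lo _ (by omega) h2 (by omega) (by omega)
    · rw [if_neg hlh]
      omega

lemma find?_eq (xs : List String) (_hpos : 0 < (ansRef xs).2) :
    ((List.range (xs.length - (ansRef xs).2 + 1)).find? fun s =>
        (prefOf xs).getD (s + (ansRef xs).2) 0 - (prefOf xs).getD s 0 == (ansRef xs).2) =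
      some (ansRef xs).1 := by
  obtain ⟨hwlen, hwall⟩ := ansRef_win xs.length xs le_rfl
  have hs0 : (ansRef xs).1 ≤ xs.length - (ansRef xs).2 := by omega
  set M := (ansRef xs).2 with hM
  set s0 := (ansRef xs).1 with hs0def
  have hk : xs.length - M + 1 = s0 + (xs.length - M + 1 - s0) := by omega
  rw [hk, List.range_add, List.find?_append]
  have hnone : (List.range s0).find? (fun s =>
      (prefOf xs).getD (s + M) 0 - (prefOf xs).getD s 0 == M) = none := by
    rw [List.find?_eq_none]
    intro j hj
    rw [List.mem_range] at hj
    rw [window_pred_iff xs j M (by omega)]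
    have := ansRef_min xs.length xs le_rfl j (by omega)
    simpa using this
  rw [hnone]
  have hk2 : xs.length - M + 1 - s0 = (xs.length - M - s0) + 1 := by omega
  rw [hk2, List.range_succ_eq_map, List.map_cons, Option.none_or,
    List.find?_cons_of_pos]
  · simp
  · simp only [Nat.add_zero]
    rw [window_pred_iff xs s0 M (by omega)]
    exact hwall

-- ===== VERDICT (by name: the statement is the Claim_ definition above) =====
theorem subsecuencia_mas_larga_spec : Claim_equal_subsecuencia_mas_larga := by
  intro xs _
  unfold Spec_subsecuencia_mas_larga
  simp only [subsecuencia_mas_larga, subsecuencia_mas_larga_alt]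
  obtain ⟨h1, h2⟩ := loopA_sim xs 0 (0, 0) []
  simp only [List.length_nil, Nat.cast_zero] at h1 h2
  have hM : (ansRef xs).2 ≤ xs.length := by
    obtain ⟨hw, _⟩ := ansRef_win xs.length xs le_rfl
    omega
  have hbs := bsrch_eq xs.length xs 0 xs.length (by omega) (by omega) hM le_rfl
  have hmain := finA_ansRef xs.length xs 0 0 0 le_rfl le_rfl
  simp only [finA, zero_add] at hmain
  rw [h1, h2, hbs, hmain]
  by_cases h0 : (ansRef xs).2 = 0
  · rw [if_pos h0, if_neg (by omega)]
  · rw [if_neg h0, if_pos (by omega), find?_eq xs (Nat.pos_of_ne_zero h0)]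
    simp
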